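-- pv_equiv track=rewrite | github.com/Mil000D/RAGERaps | backend/csv_chunker/csv_processor.py | _get_encoding_fallbacks
-- ===== SOURCE A (Python) =====
-- from typing import List, AsyncGenerator
--
-- def _get_encoding_fallbacks(detected_encoding: str) -> List[str]:
--     """
--     Get a list of encodings to try, starting with the detected one.
--
--     Args:
--         detected_encoding: The encoding detected by chardet
--
--     Returns:
--         List[str]: List of encodings to try in order
--     """
--
--     common_encodings = ["utf-8", "utf-8-sig", "latin1", "cp1252", "iso-8859-1"]
--
--     if detected_encoding and detected_encoding.lower() not in [
--         enc.lower() for enc in common_encodings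
--     ]:
--         return [detected_encoding] + common_encodings
--
--     if detected_encoding:
--         encodings = [detected_encoding]
--         encodings.extend(
--             [
--                 enc
--                 for enc in common_encodings
--                 if enc.lower() != detected_encoding.lower()
--             ]
--         )
--         return encodings
--
--     return common_encodings
-- ===== SOURCE B (Python) =====
-- def _get_encoding_fallbacks(detected_encoding: str):
--     common_encodings = ["utf-8", "utf-8-sig", "latin1", "cp1252", "iso-8859-1"]
--     candidates = ([detected_encoding] if detected_encoding else []) + common_encodings
--     result = []
--     seen = set()
--     for enc in candidates:
--         key = enc.lower()
--         if key not in seen: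
--             seen.add(key)
--             result.append(enc)
--     return result
-- ===== Notes on version B (the rewrite author's own statement) =====
-- stated objective: simpler
-- what changed: Replaces A's three membership-special-cased branches with one order-preserving dedup pass over [detected]+common using a set of lowercased names.
import Mathlib
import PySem

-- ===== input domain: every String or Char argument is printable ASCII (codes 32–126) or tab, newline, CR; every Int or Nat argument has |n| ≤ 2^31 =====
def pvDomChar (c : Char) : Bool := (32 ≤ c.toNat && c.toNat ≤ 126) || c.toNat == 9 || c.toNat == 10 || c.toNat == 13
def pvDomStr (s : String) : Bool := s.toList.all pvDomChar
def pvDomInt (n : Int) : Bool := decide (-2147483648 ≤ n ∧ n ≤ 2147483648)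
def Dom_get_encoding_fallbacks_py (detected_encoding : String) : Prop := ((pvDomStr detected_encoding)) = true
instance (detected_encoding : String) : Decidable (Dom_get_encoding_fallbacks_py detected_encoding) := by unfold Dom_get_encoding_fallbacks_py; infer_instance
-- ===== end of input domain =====

-- B replaces A's three membership-special-cased branches with a single seen-set dedup pass (simpler decomposition).

-- ===== PORT A =====
def get_encoding_fallbacks_py (detected_encoding : String) : List String :=
  let common_encodings := ["utf-8", "utf-8-sig", "latin1", "cp1252", "iso-8859-1"]
  if detected_encoding ≠ "" ∧
      PySem.Str.lower detected_encoding ∉ common_encodings.map (fun enc => PySem.Str.lower enc) then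
    [detected_encoding] ++ common_encodings
  else if detected_encoding ≠ "" then
    let encodings := [detected_encoding]
    let encodings := encodings ++
      common_encodings.filter (fun enc => PySem.Str.lower enc ≠ PySem.Str.lower detected_encoding)
    encodings
  else
    common_encodings

-- ===== PORT B =====
def get_encoding_fallbacks_py_alt (detected_encoding : String) : List String :=
  let common_encodings := ["utf-8", "utf-8-sig", "latin1", "cp1252", "iso-8859-1"]
  let candidates := (if detected_encoding ≠ "" then [detected_encoding] else []) ++ common_encodings
  (candidates.foldl
    (fun (st : List String × PySem.Set String) enc =>
      let key := PySem.Str.lower enc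
      if PySem.Set.contains st.2 key then st
      else (st.1 ++ [enc], PySem.Set.add st.2 key))
    ([], PySem.Set.empty)).1

-- ===== PRECONDITION & SPEC =====
def Spec_get_encoding_fallbacks_py (detected_encoding : String) (out : List String) : Prop := out = get_encoding_fallbacks_py_alt detected_encoding
instance (detected_encoding : String) (out : List String) : Decidable (Spec_get_encoding_fallbacks_py detected_encoding out) := by unfold Spec_get_encoding_fallbacks_py; infer_instance

-- ===== CLAIM (what is proved, stated in full; the proofs are below) =====
def Claim_equal_get_encoding_fallbacks_py : Prop := ∀ (detected_encoding : String), Dom_get_encoding_fallbacks_py detected_encoding → Spec_get_encoding_fallbacks_py detected_encoding (get_encoding_fallbacks_py detected_encoding)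

-- ===== LEMMAS AND PROOFS =====

-- ===== VERDICT (by name: the statement is the Claim_ definition above) =====
theorem get_encoding_fallbacks_py_spec : Claim_equal_get_encoding_fallbacks_py := by
  intro d _
  unfold Spec_get_encoding_fallbacks_py get_encoding_fallbacks_py get_encoding_fallbacks_py_alt
  by_cases hd : d = ""
  · subst hd; decide
  · have e1 : PySem.Str.lower "utf-8" = "utf-8" := by decide
    have e2 : PySem.Str.lower "utf-8-sig" = "utf-8-sig" := by decide
    have e3 : PySem.Str.lower "latin1" = "latin1" := by decide
    have e4 : PySem.Str.lower "cp1252" = "cp1252" := by decide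
    have e5 : PySem.Str.lower "iso-8859-1" = "iso-8859-1" := by decide
    by_cases h1 : PySem.Str.lower d = "utf-8"
    · simp [hd, h1, e1, e2, e3, e4, e5, PySem.Set.contains, PySem.Set.add, PySem.Set.empty, List.foldl, List.mem_cons, List.not_mem_nil]
    · by_cases h2 : PySem.Str.lower d = "utf-8-sig"
      · simp [hd, h2, e1, e2, e3, e4, e5, PySem.Set.contains, PySem.Set.add, PySem.Set.empty, List.foldl, List.mem_cons, List.not_mem_nil]
      · by_cases h3 : PySem.Str.lower d = "latin1"
        · simp [hd, h3, e1, e2, e3, e4, e5, PySem.Set.contains, PySem.Set.add, PySem.Set.empty, List.foldl, List.mem_cons, List.not_mem_nil]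
        · by_cases h4 : PySem.Str.lower d = "cp1252"
          · simp [hd, h4, e1, e2, e3, e4, e5, PySem.Set.contains, PySem.Set.add, PySem.Set.empty, List.foldl, List.mem_cons, List.not_mem_nil]
          · by_cases h5 : PySem.Str.lower d = "iso-8859-1"
            · simp [hd, h5, e1, e2, e3, e4, e5, PySem.Set.contains, PySem.Set.add, PySem.Set.empty, List.foldl, List.mem_cons, List.not_mem_nil]
            · simp [hd, Ne.symm h1, Ne.symm h2, Ne.symm h3, Ne.symm h4, Ne.symm h5, e1, e2, e3, e4, e5, PySem.Set.contains, PySem.Set.add, PySem.Set.empty, List.foldl, List.mem_cons, List.not_mem_nil]
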